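-- pv_equiv track=rewrite | github.com/rhyn0/AdventOfCode-Solvings | aoc_solvings/src_2022/day8.py | _traverse_r
-- ===== SOURCE A (Python) =====
-- def _traverse_r(row: int, data: list[list[int]]) -> set[tuple[int, int]]:
--     begin, end = 0, len(data[row]) - 1
--     begin_prev, end_prev = -1, -1
--     ret_set = set()
--     while begin < end:
--         if data[row][begin] > begin_prev:
--             ret_set.add((row, begin))
--             begin_prev = data[row][begin]
--         if data[row][end] > end_prev:
--             ret_set.add((row, end))
--             end_prev = data[row][end]
--
--         if data[row][begin] >= data[row][end]:
--             end -= 1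
--         else:
--             begin += 1
--
--     return ret_set
-- ===== SOURCE B (Python) =====
-- def _traverse_r(row: int, data: list[list[int]]) -> set[tuple[int, int]]:
--     line = data[row]
--
--     def scan(indices):
--         seen = set()
--         tallest = -1
--         for i in indices:
--             if line[i] > tallest:
--                 seen.add((row, i))
--                 tallest = line[i]
--         return seen
--
--     return scan(range(len(line))) | scan(reversed(range(len(line))))
-- ===== Notes on version B (the rewrite author's own statement) =====
-- stated objective: simpler
-- what changed: Replaces the converging two-pointer sweep (which re-tests both ends every iteration and interleaves four conditionals with pointer bookkeeping) by two independent one-directional running-maximum scans whose results are unioned.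
-- intended difference: On a row of length 1 whose single tree has height > -1, A returns set() because its while-loop body never runs, while B returns {(row, 0)}; a lone tree is visible from both ends, so B's value is the intended one. — e.g. on _traverse_r(0, [[5]]): A returns [], B returns [(0, 0)]
import Mathlib
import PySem

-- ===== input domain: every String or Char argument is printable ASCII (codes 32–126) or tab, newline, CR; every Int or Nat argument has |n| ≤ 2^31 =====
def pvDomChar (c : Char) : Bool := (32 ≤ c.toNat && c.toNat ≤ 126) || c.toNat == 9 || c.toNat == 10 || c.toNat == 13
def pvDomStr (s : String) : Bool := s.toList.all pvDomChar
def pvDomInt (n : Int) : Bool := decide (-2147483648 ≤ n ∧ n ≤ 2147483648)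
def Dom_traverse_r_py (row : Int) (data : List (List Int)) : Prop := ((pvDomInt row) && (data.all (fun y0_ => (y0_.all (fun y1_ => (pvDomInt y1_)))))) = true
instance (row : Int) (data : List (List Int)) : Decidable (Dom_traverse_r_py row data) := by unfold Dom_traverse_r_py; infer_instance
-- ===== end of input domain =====

-- B replaces A's converging two-pointer sweep by two independent directional running-max scans
-- (simpler); on single-tree rows A's loop never runs and B counts the lone visible tree (D_ below).
-- Both Pythons return a Python set (which has no observable iteration order); both ports enumerate
-- that set sorted by position — set iteration order is not modelled, only the set is the value.

-- ===== PORT A =====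
-- A's repeated statement pair 'if data[row][p] > prev: ret_set.add((row, p)); prev = data[row][p]',
-- done once for the begin end and once for the end end of the window each iteration
def pvCheck (row : Int) (v prev pos : Int) (ret : PySem.Set (Int × Int)) : PySem.Set (Int × Int) × Int :=
  if v > prev then (PySem.Set.add ret (row, pos), v) else (ret, prev)

-- the while-loop of A: state (begin, end, begin_prev, end_prev, ret_set); fuel is only a
-- structural bound on the iteration count (the window shrinks by 1 per iteration, so the row
-- length suffices); the loop itself still stops exactly when begin >= end, as in the Python.
-- In-loop indexing is always in range under Pre_ (0 <= begin < end <= len-1).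
def pvSweepA (row : Int) (line : List Int) (fuel : Nat) (b e bp ep : Int) (ret : PySem.Set (Int × Int)) : PySem.Set (Int × Int) :=
  match fuel with
  | 0 => ret
  | fuel + 1 =>
    if b < e then
      let cb := pvCheck row (PySem.List.pyGetD line b 0) bp b ret
      let ce := pvCheck row (PySem.List.pyGetD line e 0) ep e cb.1
      if PySem.List.pyGetD line b 0 ≥ PySem.List.pyGetD line e 0
      then pvSweepA row line fuel b (e - 1) cb.2 ce.2 ce.1
      else pvSweepA row line fuel (b + 1) e cb.2 ce.2 ce.1
    else ret

-- data[row] raises outside Pre_; there pyGetD's default [] stands in for the unreached body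
def traverse_r_py (row : Int) (data : List (List Int)) : List (Int × Int) :=
  let line := PySem.List.pyGetD data row []
  PySem.List.sorted
    (pvSweepA row line line.length 0 ((line.length : Int) - 1) (-1) (-1) PySem.Set.empty)
    (fun p => p.2)

-- ===== PORT B =====
-- B's inner helper scan(indices): one running-max pass over the given index order
def pvScanB (row : Int) (line : List Int) (idxs : List Int) : PySem.Set (Int × Int) :=
  (idxs.foldl
    (fun acc i =>
      if PySem.List.pyGetD line i 0 > acc.2 then (PySem.Set.add acc.1 (row, i), PySem.List.pyGetD line i 0)
      else acc)
    (PySem.Set.empty, -1)).1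

def traverse_r_py_alt (row : Int) (data : List (List Int)) : List (Int × Int) :=
  let line := PySem.List.pyGetD data row []
  let n : Int := (line.length : Int)
  PySem.List.sorted
    (PySem.Set.union (pvScanB row line (PySem.List.pyRange 0 n 1))
                     (pvScanB row line (PySem.List.pyRange 0 n 1).reverse))
    (fun p => p.2)

-- ===== PRECONDITION & SPEC =====
-- Pre_ excludes exactly the inputs where A raises IndexError on data[row]
def Pre_traverse_r_py (row : Int) (data : List (List Int)) : Prop :=
  PySem.Raise.InRange data.length row
instance (row : Int) (data : List (List Int)) : Decidable (Pre_traverse_r_py row data) := by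
  unfold Pre_traverse_r_py; infer_instance

def pvWitness_traverse_r_py : Int × List (List Int) := (0, [[1, 2, 1]])

-- On a row of length 1 whose single tree has height > -1, A returns set() because its while-loop
-- body never runs, while B returns {(row, 0)}; a lone tree is visible, so B's value is intended.
def D_traverse_r_py (row : Int) (data : List (List Int)) : Prop :=
  (PySem.List.pyGetD data row []).length = 1 ∧
    PySem.List.pyGetD (PySem.List.pyGetD data row []) 0 0 > -1
instance (row : Int) (data : List (List Int)) : Decidable (D_traverse_r_py row data) := by
  unfold D_traverse_r_py; infer_instance

def Spec_traverse_r_py (row : Int) (data : List (List Int)) (out : List (Int × Int)) : Prop :=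
  ¬ D_traverse_r_py row data → out = traverse_r_py_alt row data
instance (row : Int) (data : List (List Int)) (out : List (Int × Int)) : Decidable (Spec_traverse_r_py row data out) := by
  unfold Spec_traverse_r_py; infer_instance

def pvDiffWitness_traverse_r_py : Int × List (List Int) := (0, [[5]])
def pvDiffWitnessOut_traverse_r_py : (List (Int × Int)) × (List (Int × Int)) := ([], [(0, 0)])

-- ===== CLAIM (what is proved, stated in full; the proofs are below) =====
def Claim_unchanged_traverse_r_py : Prop := ∀ (row : Int) (data : List (List Int)), Dom_traverse_r_py row data → Pre_traverse_r_py row data → Spec_traverse_r_py row data (traverse_r_py row data)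
def Claim_changed_traverse_r_py : Prop := Dom_traverse_r_py (pvDiffWitness_traverse_r_py.1) (pvDiffWitness_traverse_r_py.2) ∧ Pre_traverse_r_py (pvDiffWitness_traverse_r_py.1) (pvDiffWitness_traverse_r_py.2) ∧ D_traverse_r_py (pvDiffWitness_traverse_r_py.1) (pvDiffWitness_traverse_r_py.2) ∧ traverse_r_py (pvDiffWitness_traverse_r_py.1) (pvDiffWitness_traverse_r_py.2) = pvDiffWitnessOut_traverse_r_py.1 ∧ traverse_r_py_alt (pvDiffWitness_traverse_r_py.1) (pvDiffWitness_traverse_r_py.2) = pvDiffWitnessOut_traverse_r_py.2 ∧ pvDiffWitnessOut_traverse_r_py.1 ≠ pvDiffWitnessOut_traverse_r_py.2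
def Claim_exact_traverse_r_py : Prop := ∀ (row : Int) (data : List (List Int)), Dom_traverse_r_py row data → Pre_traverse_r_py row data → D_traverse_r_py row data → traverse_r_py row data ≠ traverse_r_py_alt row data

-- ===== LEMMAS AND PROOFS =====

-- value at a (Nat) position; prefix / suffix running maxima; the two directional visibilities
def pvV (line : List Int) (i : Nat) : Int := line.getD i 0
def pvPM (line : List Int) (k : Nat) : Int := (line.take k).foldl max (-1)
def pvSM (line : List Int) (k : Nat) : Int := (line.drop k).foldl max (-1)
def pvGLV (line : List Int) (i : Nat) : Prop := pvPM line i < pvV line i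
def pvGRV (line : List Int) (i : Nat) : Prop := pvSM line (i + 1) < pvV line i

-- the loop invariants of A's sweep, stated over the original row
def pvInvL (row : Int) (line : List Int) (b : Nat) (bp : Int) (ret : PySem.Set (Int × Int)) : Prop :=
  bp = pvPM line b ∨ (bp = pvPM line (b+1) ∧ (pvGLV line b → (row, (b : Int)) ∈ ret))
def pvInvR (row : Int) (line : List Int) (e : Nat) (ep : Int) (ret : PySem.Set (Int × Int)) : Prop :=
  ep = pvSM line (e+1) ∨ (ep = pvSM line e ∧ (pvGRV line e → (row, (e : Int)) ∈ ret))
def pvB4 (line : List Int) (b e : Nat) : Prop :=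
  pvPM line b = -1 ∨ ∃ j, b ≤ j ∧ j ≤ e ∧ pvPM line b < pvV line j
def pvB5 (row : Int) (line : List Int) (b e : Nat) (bp : Int) (ret : PySem.Set (Int × Int)) : Prop :=
  pvSM line (e+1) = -1 ∨ (∃ j, b ≤ j ∧ j ≤ e ∧ pvSM line (e+1) < pvV line j) ∨
    ((∀ j, b ≤ j → j ≤ e → pvV line j ≤ pvV line b) ∧ bp = pvPM line (b+1) ∧ (pvGLV line b → (row, (b : Int)) ∈ ret))

lemma pv_foldl_max_comm (l : List Int) : ∀ a x : Int, l.foldl max (max a x) = max x (l.foldl max a) := by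
  induction l with
  | nil => intro a x; simp [max_comm]
  | cons y t ih =>
      intro a x
      simp only [List.foldl_cons]
      rw [show max (max a x) y = max (max a y) x by rw [max_right_comm], ih]

lemma pv_neg_one_le_pm (line : List Int) (k : Nat) : -1 ≤ pvPM line k :=
  (PySem.List.le_foldl_max (line.take k) (-1)).1

lemma pv_neg_one_le_sm (line : List Int) (k : Nat) : -1 ≤ pvSM line k :=
  (PySem.List.le_foldl_max (line.drop k) (-1)).1

lemma pv_pm_succ (line : List Int) (k : Nat) (h : k < line.length) :
    pvPM line (k + 1) = max (pvPM line k) (pvV line k) := by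
  unfold pvPM pvV
  rw [List.take_add_one, List.foldl_append, List.getElem?_eq_getElem h]
  simp [List.getD_eq_getElem?_getD, List.getElem?_eq_getElem h]

lemma pv_drop_cons (line : List Int) (k : Nat) (h : k < line.length) :
    line.drop k = line.getD k 0 :: line.drop (k + 1) := by
  rw [List.getD_eq_getElem _ _ h]
  exact (List.getElem_cons_drop h).symm

lemma pv_sm_succ (line : List Int) (k : Nat) (h : k < line.length) :
    pvSM line k = max (pvV line k) (pvSM line (k + 1)) := by
  unfold pvSM pvV
  rw [pv_drop_cons line k h, List.foldl_cons, pv_foldl_max_comm]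

lemma pv_pm_mono (line : List Int) {j k : Nat} (h : j ≤ k) : pvPM line j ≤ pvPM line k := by
  induction k with
  | zero => simp_all
  | succ k ih =>
      rcases Nat.lt_or_ge j (k + 1) with hj | hj
      · have hjk : j ≤ k := by omega
        by_cases hk : k < line.length
        · exact le_trans (ih hjk) (by rw [pv_pm_succ line k hk]; exact le_max_left _ _)
        · have heq : line.take (k + 1) = line.take k := by
            rw [List.take_of_length_le (by omega), List.take_of_length_le (by omega)]
          unfold pvPM; rw [heq]; exact ih hjk
      · have : j = k + 1 := by omega
        subst this; exact le_refl _

lemma pv_V_le_pm (line : List Int) {j k : Nat} (hj : j < k) (hn : j < line.length) :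
    pvV line j ≤ pvPM line k :=
  le_trans (by rw [pv_pm_succ line j hn]; exact le_max_right _ _) (pv_pm_mono line hj)

lemma pv_V_le_sm (line : List Int) {k j : Nat} (hk : k ≤ j) (hn : j < line.length) :
    pvV line j ≤ pvSM line k := by
  have h2 : j - k < (line.drop k).length := by simp; omega
  have hmem : line.getD j 0 ∈ line.drop k := by
    have heq : (line.drop k)[j - k] = line.getD j 0 := by
      rw [List.getElem_drop, List.getD_eq_getElem _ _ hn]; congr 1; omega
    rw [← heq]; exact List.getElem_mem h2
  exact (PySem.List.le_foldl_max (line.drop k) (-1)).2 _ hmem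

lemma pv_sm_len (line : List Int) : pvSM line line.length = -1 := by
  unfold pvSM; simp

lemma pv_pm_zero (line : List Int) : pvPM line 0 = -1 := rfl

lemma pvCheck_snd (row v prev pos : Int) (ret : PySem.Set (Int × Int)) :
    (pvCheck row v prev pos ret).2 = max prev v := by
  unfold pvCheck
  split_ifs with h
  · show v = max prev v; omega
  · show prev = max prev v; omega

lemma pvCheck_mem (row v prev pos : Int) (ret : PySem.Set (Int × Int)) (y : Int × Int) :
    y ∈ (pvCheck row v prev pos ret).1 ↔ y ∈ ret ∨ (y = (row, pos) ∧ prev < v) := by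
  unfold pvCheck
  split_ifs with h
  · show y ∈ PySem.Set.add ret (row, pos) ↔ _
    rw [PySem.Set.mem_add]
    constructor
    · rintro (hy | hy)
      · exact Or.inl hy
      · exact Or.inr ⟨hy, h⟩
    · rintro (hy | ⟨hy, _⟩)
      · exact Or.inl hy
      · exact Or.inr hy
  · show y ∈ ret ↔ _
    constructor
    · exact Or.inl
    · rintro (hy | ⟨_, hlt⟩)
      · exact hy
      · omega

lemma pvCheck_nodup (row v prev pos : Int) (ret : PySem.Set (Int × Int)) (h : ret.Nodup) :
    ((pvCheck row v prev pos ret).1).Nodup := by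
  unfold pvCheck
  split_ifs with hc
  · exact PySem.Set.nodup_add _ _ h
  · exact h

-- membership after a sequence of Set.add's
lemma pv_mem_foldl_add (t : List (Int × Int)) :
    ∀ (s : PySem.Set (Int × Int)) (x : Int × Int),
      x ∈ t.foldl PySem.Set.add s ↔ x ∈ s ∨ x ∈ t := by
  induction t with
  | nil => simp
  | cons y t ih =>
      intro s x
      simp only [List.foldl_cons, ih, PySem.Set.mem_add, List.mem_cons]
      tauto

lemma pv_nodup_foldl_add (t : List (Int × Int)) :
    ∀ (s : PySem.Set (Int × Int)), s.Nodup → (t.foldl PySem.Set.add s).Nodup := by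
  induction t with
  | nil => intro s hs; exact hs
  | cons y t ih => intro s hs; exact ih _ (PySem.Set.nodup_add s y hs)

lemma pv_mem_union (s t : PySem.Set (Int × Int)) (x : Int × Int) :
    x ∈ PySem.Set.union s t ↔ x ∈ s ∨ x ∈ t := by
  unfold PySem.Set.union PySem.Set.update
  exact pv_mem_foldl_add t s x

lemma pv_nodup_union (s t : PySem.Set (Int × Int)) (hs : s.Nodup) :
    (PySem.Set.union s t).Nodup := by
  unfold PySem.Set.union PySem.Set.update
  exact pv_nodup_foldl_add t s hs

-- the sweep preserves Nodup
lemma pv_sweep_nodup (row : Int) (line : List Int) :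
    ∀ (fuel : Nat) (b e bp ep : Int) (ret : PySem.Set (Int × Int)),
      ret.Nodup → (pvSweepA row line fuel b e bp ep ret).Nodup := by
  intro fuel
  induction fuel with
  | zero => intro b e bp ep ret hret; exact hret
  | succ fuel ih =>
      intro b e bp ep ret hret
      rw [pvSweepA]
      split_ifs <;>
        first
        | exact hret
        | exact ih _ _ _ _ _ (pvCheck_nodup _ _ _ _ _ (pvCheck_nodup _ _ _ _ _ hret))

-- at the meeting point the element is covered by whichever side checked it first
lemma pv_meet_cover (row : Int) (line : List Int) (b : Nat) (bp ep : Int)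
    (ret : PySem.Set (Int × Int)) (hen : b < line.length)
    (hI4 : pvB4 line b b) (hI5 : pvB5 row line b b bp ret)
    (hmeet : (bp = pvPM line (b+1) ∧ (pvGLV line b → (row, (b : Int)) ∈ ret)) ∨
             (ep = pvSM line b ∧ (pvGRV line b → (row, (b : Int)) ∈ ret)))
    (hvis : pvGLV line b ∨ pvGRV line b) : (row, (b : Int)) ∈ ret := by
  rcases hmeet with ⟨_, hm⟩ | ⟨_, hm⟩
  · rcases hvis with hg | hr
    · exact hm hg
    · refine hm ?_
      unfold pvB4 at hI4
      rcases hI4 with h4a | ⟨j, hj1, hj2, hjv⟩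
      · have hs := pv_neg_one_le_sm line (b + 1)
        unfold pvGRV at hr; unfold pvGLV; omega
      · have hji : j = b := by omega
        subst hji; exact hjv
  · rcases hvis with hg | hr
    · unfold pvB5 at hI5
      rcases hI5 with h5a | ⟨j, hj1, hj2, hjv⟩ | ⟨_, _, hmL⟩
      · refine hm ?_
        have hp := pv_neg_one_le_pm line b
        unfold pvGLV at hg; unfold pvGRV; omega
      · have hji : j = b := by omega
        subst hji; exact hm hjv
      · exact hmL hg
    · exact hm hr

-- THE MAIN SWEEP LEMMA: from a reachable state of A's loop, the sweep returns ret plus exactly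
-- the positions of the remaining window [b,e] that are visible from the left or from the right.
set_option maxHeartbeats 1000000 in
lemma pv_sweep_mem (row : Int) (line : List Int) :
    ∀ (fuel b e : Nat) (bp ep : Int) (ret : PySem.Set (Int × Int)),
      e - b ≤ fuel → e < line.length → b ≤ e →
      pvInvL row line b bp ret → pvInvR row line e ep ret →
      pvB4 line b e → pvB5 row line b e bp ret →
      (b = e → ((bp = pvPM line (b+1) ∧ (pvGLV line b → (row, (b : Int)) ∈ ret)) ∨
                (ep = pvSM line e ∧ (pvGRV line e → (row, (e : Int)) ∈ ret)))) →
      ∀ x, x ∈ pvSweepA row line fuel (b : Int) (e : Int) bp ep ret ↔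
        x ∈ ret ∨ ∃ i : Nat, b ≤ i ∧ i ≤ e ∧ x = (row, (i : Int)) ∧ (pvGLV line i ∨ pvGRV line i) := by
  intro fuel
  induction fuel with
  | zero =>
      intro b e bp ep ret hd hen hbe hI2 hI3 hI4 hI5 hmeet x
      have hbeq : b = e := by omega
      subst hbeq
      constructor
      · exact Or.inl
      · rintro (hx | ⟨i, h1, h2, h3, h4⟩)
        · exact hx
        · have hieq : i = b := by omega
          subst hieq; subst h3
          exact pv_meet_cover row line i bp ep ret hen hI4 hI5 (hmeet rfl) h4
  | succ fuel ih =>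
      intro b e bp ep ret hd hen hbe hI2 hI3 hI4 hI5 hmeet x
      by_cases hblt : b < e
      case neg =>
        have hbeq : b = e := by omega
        subst hbeq
        rw [pvSweepA, if_neg (by exact lt_irrefl _)]
        constructor
        · exact Or.inl
        · rintro (hx | ⟨i, h1, h2, h3, h4⟩)
          · exact hx
          · have hieq : i = b := by omega
            subst hieq; subst h3
            exact pv_meet_cover row line i bp ep ret hen hI4 hI5 (hmeet rfl) h4
      case pos =>
      have hbn : b < line.length := by omega
      have hcast : ((b : Int)) < ((e : Int)) := by exact_mod_cast hblt
      have hvb : PySem.List.pyGetD line (b : Int) 0 = pvV line b := by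
        rw [PySem.List.pyGetD_natCast]; rfl
      have hve : PySem.List.pyGetD line (e : Int) 0 = pvV line e := by
        rw [PySem.List.pyGetD_natCast]; rfl
      rw [pvSweepA, if_pos hcast]
      simp only [hvb, hve]
      generalize hCB : pvCheck row (pvV line b) bp ((b : Int)) ret = CB
      generalize hCE : pvCheck row (pvV line e) ep ((e : Int)) CB.1 = CE
      have hpmb : pvPM line (b+1) = max (pvPM line b) (pvV line b) := pv_pm_succ line b hbn
      have hsme : pvSM line e = max (pvV line e) (pvSM line (e+1)) := pv_sm_succ line e hen
      have F1 : CB.2 = pvPM line (b+1) := by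
        rw [← hCB, pvCheck_snd]
        unfold pvInvL at hI2
        rcases hI2 with h2a | ⟨h2b, _⟩
        · rw [h2a, hpmb]
        · rw [h2b, hpmb]; omega
      have M1 : ∀ y, y ∈ CB.1 ↔ y ∈ ret ∨ (y = (row, (b : Int)) ∧ pvGLV line b) := by
        intro y
        rw [← hCB, pvCheck_mem]
        unfold pvInvL at hI2
        rcases hI2 with h2a | ⟨h2b, h2m⟩
        · rw [h2a]; exact Iff.rfl
        · rw [h2b]
          constructor
          · rintro (hy | ⟨_, hlt⟩)
            · exact Or.inl hy
            · exact absurd hlt (by rw [hpmb]; omega)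
          · rintro (hy | ⟨hy, hg⟩)
            · exact Or.inl hy
            · subst hy; exact Or.inl (h2m hg)
      have F4 : CE.2 = pvSM line e := by
        rw [← hCE, pvCheck_snd]
        unfold pvInvR at hI3
        rcases hI3 with h3a | ⟨h3b, _⟩
        · rw [h3a, hsme]; omega
        · rw [h3b, hsme]; omega
      have M2 : ∀ y, y ∈ CE.1 ↔
          y ∈ ret ∨ (y = (row, (b : Int)) ∧ pvGLV line b) ∨ (y = (row, (e : Int)) ∧ pvGRV line e) := by
        intro y
        rw [← hCE, pvCheck_mem, M1, or_assoc]
        unfold pvInvR at hI3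
        rcases hI3 with h3a | ⟨h3b, h3m⟩
        · rw [h3a]; exact Iff.rfl
        · rw [h3b]
          constructor
          · rintro (hy | hy | ⟨_, hlt⟩)
            · exact Or.inl hy
            · exact Or.inr (Or.inl hy)
            · exact absurd hlt (by rw [hsme]; omega)
          · rintro (hy | hy | ⟨hy, hg⟩)
            · exact Or.inl hy
            · exact Or.inr (Or.inl hy)
            · subst hy; exact Or.inl (h3m hg)
      have M2b : pvGLV line b → (row, (b : Int)) ∈ CE.1 := fun hg => (M2 _).2 (Or.inr (Or.inl ⟨rfl, hg⟩))
      have M2e : pvGRV line e → (row, (e : Int)) ∈ CE.1 := fun hg => (M2 _).2 (Or.inr (Or.inr ⟨rfl, hg⟩))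
      have M2r : ∀ y, y ∈ ret → y ∈ CE.1 := fun y hy => (M2 _).2 (Or.inl hy)
      by_cases hbr : pvV line b ≥ pvV line e
      · -- A retires the right end: end -= 1
        rw [if_pos hbr, show ((e : Int) - 1) = (((e - 1 : Nat)) : Int) by omega]
        have he1 : e - 1 + 1 = e := by omega
        have hglv_e : ¬ pvGLV line e := by
          have h1 : pvV line b ≤ pvPM line e := pv_V_le_pm line hblt hbn
          unfold pvGLV; omega
        have hI2' : pvInvL row line b CB.2 CE.1 := by
          unfold pvInvL; exact Or.inr ⟨F1, M2b⟩
        have hI3' : pvInvR row line (e-1) CE.2 CE.1 := by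
          unfold pvInvR; rw [he1]; exact Or.inl F4
        have hI4' : pvB4 line b (e-1) := by
          unfold pvB4 at hI4 ⊢
          rcases hI4 with h4a | ⟨j, hj1, hj2, hjv⟩
          · exact Or.inl h4a
          · by_cases hje : j = e
            · subst hje
              exact Or.inr ⟨b, le_refl _, by omega, by omega⟩
            · exact Or.inr ⟨j, hj1, by omega, hjv⟩
        have hI5' : pvB5 row line b (e-1) CB.2 CE.1 := by
          unfold pvB5 at hI5 ⊢
          rw [he1]
          by_cases hall : ∀ j, b ≤ j → j ≤ e - 1 → pvV line j ≤ pvV line b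
          · exact Or.inr (Or.inr ⟨hall, F1, M2b⟩)
          · push_neg at hall
            obtain ⟨j0, hj0b, hj0e, hj0v⟩ := hall
            rcases hI5 with h5a | ⟨j1, hj1b, hj1e, hj1v⟩ | ⟨hallold, _, _⟩
            · by_cases hse : pvSM line e = -1
              · exact Or.inl hse
              · refine Or.inr (Or.inl ⟨j0, hj0b, hj0e, ?_⟩)
                rw [hsme, h5a] at hse ⊢
                omega
            · by_cases hj0s : pvSM line (e+1) < pvV line j0
              · refine Or.inr (Or.inl ⟨j0, hj0b, hj0e, ?_⟩)
                rw [hsme]; omega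
              · have hj1ne : j1 ≠ e := by
                  intro h; subst h; omega
                refine Or.inr (Or.inl ⟨j1, hj1b, by omega, ?_⟩)
                rw [hsme]; omega
            · exact absurd (hallold j0 hj0b (by omega)) (by omega)
        have hmeet' : b = e - 1 → ((CB.2 = pvPM line (b+1) ∧ (pvGLV line b → (row, (b : Int)) ∈ CE.1)) ∨
            (CE.2 = pvSM line (e-1) ∧ (pvGRV line (e-1) → (row, ((e-1 : Nat) : Int)) ∈ CE.1))) :=
          fun _ => Or.inl ⟨F1, M2b⟩
        rw [ih b (e-1) CB.2 CE.2 CE.1 (by omega) (by omega) (by omega) hI2' hI3' hI4' hI5' hmeet' x]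
        constructor
        · rintro (hx | ⟨i, h1, h2, h3, h4⟩)
          · rcases (M2 x).1 hx with hy | ⟨hy, hg⟩ | ⟨hy, hg⟩
            · exact Or.inl hy
            · exact Or.inr ⟨b, le_refl _, by omega, hy, Or.inl hg⟩
            · exact Or.inr ⟨e, by omega, le_refl _, hy, Or.inr hg⟩
          · exact Or.inr ⟨i, h1, by omega, h3, h4⟩
        · rintro (hx | ⟨i, h1, h2, h3, h4⟩)
          · exact Or.inl (M2r x hx)
          · by_cases hie : i = e
            · subst hie; subst h3
              rcases h4 with hg | hg
              · exact absurd hg hglv_e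
              · exact Or.inl (M2e hg)
            · exact Or.inr ⟨i, h1, by omega, h3, h4⟩
      · -- A advances the left end: begin += 1
        rw [if_neg hbr, show ((b : Int) + 1) = (((b + 1 : Nat)) : Int) by omega]
        have hbr' : pvV line b < pvV line e := by omega
        have hgrv_b : ¬ pvGRV line b := by
          have h1 : pvV line e ≤ pvSM line (b+1) := pv_V_le_sm line (by omega) hen
          unfold pvGRV; omega
        have hI2' : pvInvL row line (b+1) CB.2 CE.1 := by
          unfold pvInvL; exact Or.inl F1
        have hI3' : pvInvR row line e CE.2 CE.1 := by
          unfold pvInvR; exact Or.inr ⟨F4, M2e⟩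
        have hI4' : pvB4 line (b+1) e := by
          unfold pvB4 at hI4 ⊢
          rcases hI4 with h4a | ⟨j1, hj1b, hj1e, hj1v⟩
          · by_cases hvb1 : pvV line b ≤ -1
            · refine Or.inl ?_
              rw [hpmb, h4a]; omega
            · refine Or.inr ⟨e, by omega, le_refl _, ?_⟩
              rw [hpmb, h4a]; omega
          · by_cases hc : pvPM line b < pvV line b
            · refine Or.inr ⟨e, by omega, le_refl _, ?_⟩
              rw [hpmb]; omega
            · have hj1ne : j1 ≠ b := by
                intro h; subst h; omega
              refine Or.inr ⟨j1, by omega, hj1e, ?_⟩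
              rw [hpmb]; omega
        have hI5' : pvB5 row line (b+1) e CB.2 CE.1 := by
          unfold pvB5 at hI5 ⊢
          rcases hI5 with h5a | ⟨j1, hj1b, hj1e, hj1v⟩ | ⟨hallold, _, _⟩
          · exact Or.inl h5a
          · by_cases hj1b' : j1 = b
            · subst hj1b'
              exact Or.inr (Or.inl ⟨e, by omega, le_refl _, by omega⟩)
            · exact Or.inr (Or.inl ⟨j1, by omega, hj1e, hj1v⟩)
          · exact absurd (hallold e (by omega) (le_refl _)) (by omega)
        have hmeet' : b + 1 = e → ((CB.2 = pvPM line ((b+1)+1) ∧ (pvGLV line (b+1) → (row, ((b+1 : Nat) : Int)) ∈ CE.1)) ∨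
            (CE.2 = pvSM line e ∧ (pvGRV line e → (row, (e : Int)) ∈ CE.1))) :=
          fun _ => Or.inr ⟨F4, M2e⟩
        rw [ih (b+1) e CB.2 CE.2 CE.1 (by omega) hen (by omega) hI2' hI3' hI4' hI5' hmeet' x]
        constructor
        · rintro (hx | ⟨i, h1, h2, h3, h4⟩)
          · rcases (M2 x).1 hx with hy | ⟨hy, hg⟩ | ⟨hy, hg⟩
            · exact Or.inl hy
            · exact Or.inr ⟨b, le_refl _, by omega, hy, Or.inl hg⟩
            · exact Or.inr ⟨e, by omega, le_refl _, hy, Or.inr hg⟩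
          · exact Or.inr ⟨i, by omega, h2, h3, h4⟩
        · rintro (hx | ⟨i, h1, h2, h3, h4⟩)
          · exact Or.inl (M2r x hx)
          · by_cases hib : i = b
            · subst hib; subst h3
              rcases h4 with hg | hg
              · exact Or.inl (M2b hg)
              · exact absurd hg hgrv_b
            · exact Or.inr ⟨i, by omega, h2, h3, h4⟩

-- B's left-to-right scan characterised
lemma pv_scanL_mem (row : Int) (line : List Int) :
    ∀ (m k : Nat) (s : PySem.Set (Int × Int)), k + m = line.length →
      ∀ x, x ∈ (((List.range' k m).map (fun i : Nat => (i : Int))).foldl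
          (fun acc i =>
            if PySem.List.pyGetD line i 0 > acc.2 then (PySem.Set.add acc.1 (row, i), PySem.List.pyGetD line i 0)
            else acc)
          (s, pvPM line k)).1 ↔
        x ∈ s ∨ ∃ i : Nat, k ≤ i ∧ i < line.length ∧ x = (row, (i : Int)) ∧ pvGLV line i := by
  intro m
  induction m with
  | zero =>
      intro k s hkm x
      rw [List.range'_zero]
      simp only [List.map_nil, List.foldl_nil]
      constructor
      · exact Or.inl
      · rintro (hx | ⟨i, h1, h2, _, _⟩)
        · exact hx
        · omega
  | succ m ihm =>
      intro k s hkm x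
      have hkn : k < line.length := by omega
      rw [List.range'_succ]
      simp only [List.map_cons, List.foldl_cons]
      have hvk : PySem.List.pyGetD line (k : Int) 0 = pvV line k := by
        rw [PySem.List.pyGetD_natCast]; rfl
      simp only [hvk]
      have hpmk : pvPM line (k+1) = max (pvPM line k) (pvV line k) := pv_pm_succ line k hkn
      by_cases hc : pvV line k > pvPM line k
      · rw [if_pos hc]
        have h2 : pvV line k = pvPM line (k+1) := by rw [hpmk]; omega
        rw [h2, ihm (k+1) _ (by omega) x]
        simp only [PySem.Set.mem_add]
        constructor
        · rintro ((hx | hy) | ⟨i, h1, h2', h3, h4⟩)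
          · exact Or.inl hx
          · exact Or.inr ⟨k, le_refl _, hkn, hy, hc⟩
          · exact Or.inr ⟨i, by omega, h2', h3, h4⟩
        · rintro (hx | ⟨i, h1, h2', h3, h4⟩)
          · exact Or.inl (Or.inl hx)
          · by_cases hik : i = k
            · subst hik; exact Or.inl (Or.inr h3)
            · exact Or.inr ⟨i, by omega, h2', h3, h4⟩
      · rw [if_neg hc]
        have h2 : pvPM line k = pvPM line (k+1) := by rw [hpmk]; omega
        rw [h2, ihm (k+1) _ (by omega) x]
        constructor
        · rintro (hx | ⟨i, h1, h2', h3, h4⟩)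
          · exact Or.inl hx
          · exact Or.inr ⟨i, by omega, h2', h3, h4⟩
        · rintro (hx | ⟨i, h1, h2', h3, h4⟩)
          · exact Or.inl hx
          · by_cases hik : i = k
            · subst hik; exact absurd h4 hc
            · exact Or.inr ⟨i, by omega, h2', h3, h4⟩

-- B's right-to-left scan characterised
lemma pv_scanR_mem (row : Int) (line : List Int) :
    ∀ (k : Nat) (s : PySem.Set (Int × Int)), k ≤ line.length →
      ∀ x, x ∈ ((((List.range k).reverse).map (fun i : Nat => (i : Int))).foldl
          (fun acc i =>
            if PySem.List.pyGetD line i 0 > acc.2 then (PySem.Set.add acc.1 (row, i), PySem.List.pyGetD line i 0)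
            else acc)
          (s, pvSM line k)).1 ↔
        x ∈ s ∨ ∃ i : Nat, i < k ∧ x = (row, (i : Int)) ∧ pvGRV line i := by
  intro k
  induction k with
  | zero =>
      intro s _ x
      simp only [List.range_zero, List.reverse_nil, List.map_nil, List.foldl_nil]
      constructor
      · exact Or.inl
      · rintro (hx | ⟨i, h1, _, _⟩)
        · exact hx
        · omega
  | succ k ihk =>
      intro s hk x
      have hkn : k < line.length := by omega
      rw [List.range_succ, List.reverse_append]
      simp only [List.reverse_cons, List.reverse_nil, List.nil_append, List.cons_append,
        List.map_cons, List.foldl_cons]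
      have hvk : PySem.List.pyGetD line (k : Int) 0 = pvV line k := by
        rw [PySem.List.pyGetD_natCast]; rfl
      simp only [hvk]
      have hsmk : pvSM line k = max (pvV line k) (pvSM line (k+1)) := pv_sm_succ line k hkn
      by_cases hc : pvV line k > pvSM line (k+1)
      · rw [if_pos hc]
        have h2 : pvV line k = pvSM line k := by rw [hsmk]; omega
        rw [h2, ihk _ (by omega) x]
        simp only [PySem.Set.mem_add]
        constructor
        · rintro ((hx | hy) | ⟨i, h1, h3, h4⟩)
          · exact Or.inl hx
          · exact Or.inr ⟨k, by omega, hy, hc⟩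
          · exact Or.inr ⟨i, by omega, h3, h4⟩
        · rintro (hx | ⟨i, h1, h3, h4⟩)
          · exact Or.inl (Or.inl hx)
          · by_cases hik : i = k
            · subst hik; exact Or.inl (Or.inr h3)
            · exact Or.inr ⟨i, by omega, h3, h4⟩
      · rw [if_neg hc]
        have h2 : pvSM line (k+1) = pvSM line k := by rw [hsmk]; omega
        rw [h2, ihk _ (by omega) x]
        constructor
        · rintro (hx | ⟨i, h1, h3, h4⟩)
          · exact Or.inl hx
          · exact Or.inr ⟨i, by omega, h3, h4⟩
        · rintro (hx | ⟨i, h1, h3, h4⟩)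
          · exact Or.inl hx
          · by_cases hik : i = k
            · subst hik; exact absurd h4 hc
            · exact Or.inr ⟨i, by omega, h3, h4⟩

lemma pv_scan_nodup (row : Int) (line : List Int) :
    ∀ (idxs : List Int) (acc : PySem.Set (Int × Int) × Int), acc.1.Nodup →
      ((idxs.foldl
          (fun acc i =>
            if PySem.List.pyGetD line i 0 > acc.2 then (PySem.Set.add acc.1 (row, i), PySem.List.pyGetD line i 0)
            else acc)
          acc).1).Nodup := by
  intro idxs
  induction idxs with
  | nil => intro acc h; exact h
  | cons i t ih =>
      intro acc h
      simp only [List.foldl_cons]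
      by_cases hc : PySem.List.pyGetD line i 0 > acc.2
      · rw [if_pos hc]; exact ih _ (PySem.Set.nodup_add _ _ h)
      · rw [if_neg hc]; exact ih _ h

-- the canonical (position-sorted) enumeration of the visible set of a row
def pvCanon (row : Int) (line : List Int) : List (Int × Int) :=
  List.map (fun i : Nat => (row, (i : Int)))
    (List.filter (fun i => decide (pvPM line i < pvV line i ∨ pvSM line (i + 1) < pvV line i))
      (List.range line.length))

lemma pv_canon_nodup (row : Int) (line : List Int) : (pvCanon row line).Nodup := by
  unfold pvCanon
  have hinj : Function.Injective (fun i : Nat => ((row, (i : Int)) : Int × Int)) := by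
    intro a b h
    simpa using congrArg Prod.snd h
  exact List.Nodup.map hinj (List.Nodup.filter _ List.nodup_range)

lemma pv_canon_mem (row : Int) (line : List Int) (x : Int × Int) :
    x ∈ pvCanon row line ↔ ∃ i : Nat, i < line.length ∧ x = (row, (i : Int)) ∧ (pvGLV line i ∨ pvGRV line i) := by
  unfold pvCanon
  simp only [List.mem_map, List.mem_filter, List.mem_range, decide_eq_true_eq]
  constructor
  · rintro ⟨i, ⟨h1, h2⟩, rfl⟩; exact ⟨i, h1, rfl, h2⟩
  · rintro ⟨i, h1, rfl, h2⟩; exact ⟨i, ⟨h1, h2⟩, rfl⟩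

lemma pv_canon_pairwise (row : Int) (line : List Int) :
    (pvCanon row line).Pairwise (fun a b => a.2 < b.2) := by
  unfold pvCanon
  have hp : (List.filter (fun i => decide (pvPM line i < pvV line i ∨ pvSM line (i + 1) < pvV line i)) (List.range line.length)).Pairwise (· < ·) := by
    exact List.Pairwise.sublist List.filter_sublist List.pairwise_lt_range
  rw [List.pairwise_map]
  exact hp.imp (fun h => by simpa using h)

-- common reduction: a Nodup set with the canonical membership sorts to the canonical enumeration
lemma pv_sorted_eq_canon (row : Int) (s : PySem.Set (Int × Int)) (line : List Int)
    (hnd : s.Nodup)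
    (hmem : ∀ x, x ∈ s ↔ ∃ i : Nat, i < line.length ∧ x = (row, (i : Int)) ∧ (pvGLV line i ∨ pvGRV line i)) :
    PySem.List.sorted s (fun p => p.2) = pvCanon row line := by
  refine PySem.List.sorted_eq_of_perm_of_pairwise_lt s (pvCanon row line) (fun p => p.2) ?_ (pv_canon_pairwise row line)
  refine (List.perm_ext_iff_of_nodup (pv_canon_nodup row line) hnd).2 ?_
  intro a
  rw [pv_canon_mem, hmem]

lemma pv_empty_nodup : (PySem.Set.empty : PySem.Set (Int × Int)).Nodup := List.nodup_nil

lemma pv_empty_not_mem (x : Int × Int) : x ∈ (PySem.Set.empty : PySem.Set (Int × Int)) ↔ False := by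
  constructor
  · intro h; exact (List.not_mem_nil) h
  · intro h; exact h.elim

-- A's sweep over a full row of length ≥ 2 collects exactly the visible positions
lemma pv_sweepA_full (row : Int) (line : List Int) (h2 : 2 ≤ line.length) (x : Int × Int) :
    x ∈ pvSweepA row line line.length 0 ((line.length : Int) - 1) (-1) (-1) PySem.Set.empty ↔
      ∃ i : Nat, i < line.length ∧ x = (row, (i : Int)) ∧ (pvGLV line i ∨ pvGRV line i) := by
  have hc1 : ((line.length : Int) - 1) = (((line.length - 1 : Nat)) : Int) := by omega
  have hlast : line.length - 1 + 1 = line.length := by omega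
  have h := pv_sweep_mem row line line.length 0 (line.length - 1) (-1) (-1) PySem.Set.empty
    (by omega) (by omega) (by omega)
    (by unfold pvInvL; exact Or.inl (pv_pm_zero line).symm)
    (by unfold pvInvR; rw [hlast]; exact Or.inl (pv_sm_len line).symm)
    (by unfold pvB4; exact Or.inl (pv_pm_zero line))
    (by unfold pvB5; rw [hlast]; exact Or.inl (pv_sm_len line))
    (fun h0 => absurd h0 (by omega)) x
  rw [Nat.cast_zero] at h
  rw [hc1, h, pv_empty_not_mem]
  constructor
  · rintro (hf | ⟨i, _, hi2, hi3, hi4⟩)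
    · exact hf.elim
    · exact ⟨i, by omega, hi3, hi4⟩
  · rintro ⟨i, hi1, hi3, hi4⟩
    exact Or.inr ⟨i, by omega, by omega, hi3, hi4⟩

-- B's union over a full row collects exactly the visible positions
lemma pv_scanB_union_full (row : Int) (line : List Int) (x : Int × Int) :
    x ∈ PySem.Set.union (pvScanB row line (PySem.List.pyRange 0 (line.length : Int) 1))
        (pvScanB row line (PySem.List.pyRange 0 (line.length : Int) 1).reverse) ↔
      ∃ i : Nat, i < line.length ∧ x = (row, (i : Int)) ∧ (pvGLV line i ∨ pvGRV line i) := by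
  have hrange : PySem.List.pyRange 0 (line.length : Int) 1 = (List.range line.length).map (fun i : Nat => (i : Int)) :=
    PySem.List.pyRange_zero_natCast line.length
  have hs1 : ∀ y, y ∈ pvScanB row line (PySem.List.pyRange 0 (line.length : Int) 1) ↔
      ∃ i : Nat, i < line.length ∧ y = (row, (i : Int)) ∧ pvGLV line i := by
    intro y
    unfold pvScanB
    rw [hrange, List.range_eq_range']
    have h := pv_scanL_mem row line line.length 0 PySem.Set.empty (by omega) y
    rw [pv_pm_zero] at h
    rw [h, pv_empty_not_mem]
    constructor
    · rintro (hf | ⟨i, _, hi2, hi3, hi4⟩)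
      · exact hf.elim
      · exact ⟨i, hi2, hi3, hi4⟩
    · rintro ⟨i, hi1, hi3, hi4⟩
      exact Or.inr ⟨i, by omega, hi1, hi3, hi4⟩
  have hs2 : ∀ y, y ∈ pvScanB row line (PySem.List.pyRange 0 (line.length : Int) 1).reverse ↔
      ∃ i : Nat, i < line.length ∧ y = (row, (i : Int)) ∧ pvGRV line i := by
    intro y
    unfold pvScanB
    rw [hrange, ← List.map_reverse]
    have h := pv_scanR_mem row line line.length PySem.Set.empty (le_refl _) y
    rw [pv_sm_len] at h
    rw [h, pv_empty_not_mem]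
    constructor
    · rintro (hf | ⟨i, hi1, hi3, hi4⟩)
      · exact hf.elim
      · exact ⟨i, hi1, hi3, hi4⟩
    · rintro ⟨i, hi1, hi3, hi4⟩
      exact Or.inr ⟨i, hi1, hi3, hi4⟩
  rw [pv_mem_union, hs1, hs2]
  constructor
  · rintro (⟨i, h1, h2, h3⟩ | ⟨i, h1, h2, h3⟩)
    · exact ⟨i, h1, h2, Or.inl h3⟩
    · exact ⟨i, h1, h2, Or.inr h3⟩
  · rintro ⟨i, h1, h2, h3 | h3⟩
    · exact Or.inl ⟨i, h1, h2, h3⟩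
    · exact Or.inr ⟨i, h1, h2, h3⟩

lemma pv_scanB_nodup (row : Int) (line : List Int) (idxs : List Int) : (pvScanB row line idxs).Nodup := by
  unfold pvScanB
  exact pv_scan_nodup row line idxs _ pv_empty_nodup

-- the single-tree row: B records position 0 exactly when the lone height exceeds -1
lemma pv_alt_single (row : Int) (v : Int) (data : List (List Int))
    (hline : PySem.List.pyGetD data row [] = [v]) :
    traverse_r_py_alt row data =
      if (-1 : Int) < v then [(row, 0)] else [] := by
  unfold traverse_r_py_alt
  simp only [hline]
  have hl1 : ((([v] : List Int).length : Int)) = 1 := by simp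
  rw [hl1]
  have h1 : PySem.List.pyRange 0 (1 : Int) 1 = [(0 : Int)] := by decide
  rw [h1]
  have hv0 : PySem.List.pyGetD [v] (0 : Int) 0 = v := rfl
  unfold pvScanB
  simp only [List.reverse_cons, List.reverse_nil, List.nil_append, List.foldl_cons, List.foldl_nil, hv0]
  by_cases hc : v > -1
  · rw [if_pos hc, if_pos (by omega : (-1 : Int) < v)]
    show PySem.List.sorted
        (PySem.Set.union (PySem.Set.add PySem.Set.empty (row, 0)) (PySem.Set.add PySem.Set.empty (row, 0)))
        (fun p => p.2) = [(row, 0)]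
    have hs : PySem.Set.add PySem.Set.empty ((row, (0 : Int)) : Int × Int) = [(row, 0)] := rfl
    rw [hs]
    refine PySem.List.sorted_eq_of_perm_of_pairwise_lt
        (PySem.Set.union [((row, (0 : Int)) : Int × Int)] [((row, (0 : Int)) : Int × Int)])
        [((row, (0 : Int)) : Int × Int)] (fun p : Int × Int => p.2) ?_ (List.pairwise_singleton _ _)
    refine (List.perm_ext_iff_of_nodup (by simp) (pv_nodup_union _ _ (by simp))).2 ?_
    intro a
    rw [pv_mem_union]
    simp
  · rw [if_neg hc, if_neg (by omega : ¬ ((-1 : Int) < v))]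
    rfl

-- ===== VERDICT (by name: the statement is the Claim_ definition above) =====
theorem traverse_r_py_spec : Claim_unchanged_traverse_r_py := by
  intro row data _hdom _hpre
  unfold Spec_traverse_r_py
  intro hnD
  unfold D_traverse_r_py at hnD
  rcases hline : PySem.List.pyGetD data row [] with _ | ⟨v, _ | ⟨w, t⟩⟩
  · -- empty row: both sides are []
    unfold traverse_r_py traverse_r_py_alt
    simp only [hline]
    have hl0 : ((([] : List Int).length : Int)) = 0 := by simp
    rw [hl0]
    have h0 : PySem.List.pyRange 0 (0 : Int) 1 = [] := by decide
    rw [h0]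
    rfl
  · -- single-tree row: outside D_ its tree has height ≤ -1, so neither side records anything
    rw [hline] at hnD
    have hv : v ≤ -1 := by
      by_contra hv
      exact hnD ⟨rfl, by simpa using by omega⟩
    rw [pv_alt_single row v data hline, if_neg (by omega : ¬ ((-1 : Int) < v))]
    unfold traverse_r_py
    simp only [hline]
    rfl
  · -- at least two trees: both sides enumerate the same visible set, sorted by position
    unfold traverse_r_py traverse_r_py_alt
    simp only [hline]
    have h2 : 2 ≤ (v :: w :: t).length := by simp
    rw [pv_sorted_eq_canon row _ (v :: w :: t)
          (pv_sweep_nodup row (v :: w :: t) (v :: w :: t).length 0 (((v :: w :: t).length : Int) - 1) (-1) (-1) PySem.Set.empty pv_empty_nodup)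
          (pv_sweepA_full row (v :: w :: t) h2),
        pv_sorted_eq_canon row _ (v :: w :: t)
          (pv_nodup_union _ _ (pv_scanB_nodup row _ _))
          (pv_scanB_union_full row (v :: w :: t))]

-- A returns [] on a D_ row, B records the lone visible tree
theorem traverse_r_py_tight : Claim_exact_traverse_r_py := by
  intro row data _hdom _hpre hD
  obtain ⟨hlen, hval⟩ := hD
  obtain ⟨v, hv⟩ := List.length_eq_one_iff.1 hlen
  have hval' : (-1 : Int) < v := by
    rw [hv] at hval
    simpa using hval
  rw [pv_alt_single row v data hv, if_pos hval']
  unfold traverse_r_py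
  simp only [hv]
  intro h
  exact List.cons_ne_nil _ _ h.symm

theorem traverse_r_py_changed : Claim_changed_traverse_r_py := by
  unfold Claim_changed_traverse_r_py
  decide
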